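-- pv_equiv track=rewrite | github.com/nwfsc-fram/pyFieldSoftware | py/observer/ObserverState.py | strip_db_comment
-- ===== SOURCE A (Python) =====
-- def strip_db_comment(comment):
--     remove_text = ['\r', '\n']
--     replace_text = [(',', '|')]
--     for r in remove_text:
--         comment = comment.replace(r, '')
--     for r in replace_text:
--         comment = comment.replace(r[0], r[1])
--     return comment
-- ===== SOURCE B (Python) =====
-- def strip_db_comment(comment):
--     return ''.join('' if c in '\r\n' else '|' if c == ',' else c for c in comment)
-- ===== Notes on version B (the rewrite author's own statement) =====
-- stated objective: alternative
-- what changed: Replaces the three sequential str.replace scans with a single character-by-character pass that drops carriage returns and line feeds and substitutes a pipe for each comma, joined once.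
import Mathlib
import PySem

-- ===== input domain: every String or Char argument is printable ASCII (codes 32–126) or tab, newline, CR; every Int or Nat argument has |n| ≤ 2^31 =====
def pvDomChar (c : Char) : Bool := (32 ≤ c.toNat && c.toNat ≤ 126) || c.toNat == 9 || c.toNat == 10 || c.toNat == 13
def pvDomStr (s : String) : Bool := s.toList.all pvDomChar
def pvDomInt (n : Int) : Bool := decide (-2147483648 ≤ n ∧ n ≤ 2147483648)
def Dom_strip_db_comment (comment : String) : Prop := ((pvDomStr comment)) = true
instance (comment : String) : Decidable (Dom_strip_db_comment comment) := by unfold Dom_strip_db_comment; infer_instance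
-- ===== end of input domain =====

-- B makes one pass over the characters instead of A's three replace scans; return value only, no claim beyond the theorems below.

-- ===== PORT A =====
-- A: comment.replace('\r','').replace('\n','') then replace(',','|'), via the two loops over the literal lists.
def strip_db_comment (comment : String) : String :=
  let comment := (["\r", "\n"] : List String).foldl (fun acc r => PySem.Str.replace acc r "") comment
  let comment := ([(",", "|")] : List (String × String)).foldl (fun acc r => PySem.Str.replace acc r.1 r.2) comment
  comment

-- ===== PORT B =====
-- B: ''.join('' if c in '\r\n' else '|' if c == ',' else c for c in comment)
def strip_db_comment_alt (comment : String) : String :=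
  String.ofList (comment.toList.flatMap (fun c =>
    if c = '\r' ∨ c = '\n' then [] else if c = ',' then ['|'] else [c]))

-- ===== PRECONDITION & SPEC =====
def Spec_strip_db_comment (comment : String) (out : String) : Prop := out = strip_db_comment_alt comment
instance (comment : String) (out : String) : Decidable (Spec_strip_db_comment comment out) := by unfold Spec_strip_db_comment; infer_instance

-- ===== CLAIM (what is proved, stated in full; the proofs are below) =====
def Claim_equal_strip_db_comment : Prop := ∀ (comment : String), Dom_strip_db_comment comment → Spec_strip_db_comment comment (strip_db_comment comment)

-- ===== LEMMAS AND PROOFS =====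

theorem replace_go_single (a : Char) (new : List Char) :
    ∀ (l : List Char) (fuel : Nat) (acc : List Char), l.length ≤ fuel →
      PySem.Chars.replace.go [a] new fuel l acc
        = acc.reverse ++ l.flatMap (fun c => if c = a then new else [c]) := by
  intro l
  induction l with
  | nil =>
      intro fuel acc _
      cases fuel <;> simp [PySem.Chars.replace.go]
  | cons c t ih =>
      intro fuel acc h
      cases fuel with
      | zero => simp at h
      | succ n =>
        simp only [PySem.Chars.replace.go]
        by_cases hc : a = c
        · subst hc
          rw [if_pos (by simp [List.isPrefixOf]),
              show List.drop ([a].length) (a :: t) = t from rfl,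
              ih n (new.reverse ++ acc) (by simp at h; omega)]
          simp
        · rw [if_neg (by simp [List.isPrefixOf]; intro h'; exact hc h'),
              ih n (c :: acc) (by simp at h ⊢; omega),
              List.flatMap_cons, if_neg (fun h => hc h.symm)]
          simp

theorem replace_single (s : List Char) (a : Char) (new : List Char) :
    PySem.Chars.replace s [a] new = s.flatMap (fun c => if c = a then new else [c]) := by
  rw [PySem.Chars.replace, if_neg (by simp)]
  simpa using replace_go_single a new s s.length [] (le_refl _)

theorem strip_eq (l : List Char) :
    List.flatMap (fun c => if c = ',' then ['|'] else [c])
      (List.flatMap (fun c => if c = '\n' then [] else [c])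
        (List.flatMap (fun c => if c = '\r' then [] else [c]) l))
    = List.flatMap (fun c => if c = '\r' ∨ c = '\n' then [] else if c = ',' then ['|'] else [c]) l := by
  rw [List.flatMap_assoc, List.flatMap_assoc]
  induction l with
  | nil => rfl
  | cons c t ih =>
      simp only [List.flatMap_cons, ih]
      congr 1
      by_cases h1 : c = '\r' <;> by_cases h2 : c = '\n' <;> by_cases h3 : c = ',' <;>
        simp_all

-- ===== VERDICT (by name: the statement is the Claim_ definition above) =====
theorem strip_db_comment_spec : Claim_equal_strip_db_comment := by
  intro comment _
  unfold Spec_strip_db_comment strip_db_comment strip_db_comment_alt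
  simp only [List.foldl]
  rw [show (PySem.Str.replace
      (PySem.Str.replace (PySem.Str.replace comment "\r" "") "\n" "") "," "|")
    = String.ofList (PySem.Chars.replace (PySem.Chars.replace
        (PySem.Chars.replace comment.toList "\r".toList "".toList)
        "\n".toList "".toList) ",".toList "|".toList) from by
    simp [PySem.Str.replace]]
  congr 1
  rw [show ("\r".toList = ['\r']) from rfl, show ("\n".toList = ['\n']) from rfl,
      show (",".toList = [',']) from rfl, show ("|".toList = ['|']) from rfl,
      show ("".toList = ([] : List Char)) from rfl]
  rw [replace_single, replace_single, replace_single, strip_eq]
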